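-- pv_equiv track=rewrite | github.com/bgtamang/AgriClaw | skills/field/claw-trial-design/trial_design.py | serpentine_layout
-- ===== SOURCE A (Python) =====
-- def serpentine_layout(n_plots, n_rows, n_cols):
--     """Generate serpentine (boustrophedon) plot numbering.
--
--     Returns list of (row, col) tuples for plot indices 0..n_plots-1.
--     Odd rows go left-to-right, even rows right-to-left (1-indexed rows).
--     """
--     positions = []
--     plot = 0
--     for row in range(1, n_rows + 1):
--         if row % 2 == 1:
--             cols = range(1, n_cols + 1)
--         else:
--             cols = range(n_cols, 0, -1)
--         for col in cols:
--             if plot < n_plots: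
--                 positions.append((row, col))
--                 plot += 1
--     return positions
-- ===== SOURCE B (Python) =====
-- def serpentine_layout(n_plots, n_rows, n_cols):
--     """Generate serpentine (boustrophedon) plot numbering.
--
--     Direct index arithmetic: plot k sits in row k // n_cols at offset
--     k % n_cols; loop only over the plots actually emitted.
--     """
--     if n_rows <= 0 or n_cols <= 0:
--         return []
--     n = min(n_plots, n_rows * n_cols)
--     positions = []
--     for k in range(n):
--         row, pos = divmod(k, n_cols)
--         positions.append((row + 1, pos + 1 if row % 2 == 0 else n_cols - pos))
--     return positions
-- ===== Notes on version B (the rewrite author's own statement) =====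
-- stated objective: faster
-- what changed: Replaces the nested row/column sweep over the whole grid with direct index arithmetic (row = k // n_cols, offset = k % n_cols) looping only up to min(n_plots, n_rows*n_cols).
import Mathlib
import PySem

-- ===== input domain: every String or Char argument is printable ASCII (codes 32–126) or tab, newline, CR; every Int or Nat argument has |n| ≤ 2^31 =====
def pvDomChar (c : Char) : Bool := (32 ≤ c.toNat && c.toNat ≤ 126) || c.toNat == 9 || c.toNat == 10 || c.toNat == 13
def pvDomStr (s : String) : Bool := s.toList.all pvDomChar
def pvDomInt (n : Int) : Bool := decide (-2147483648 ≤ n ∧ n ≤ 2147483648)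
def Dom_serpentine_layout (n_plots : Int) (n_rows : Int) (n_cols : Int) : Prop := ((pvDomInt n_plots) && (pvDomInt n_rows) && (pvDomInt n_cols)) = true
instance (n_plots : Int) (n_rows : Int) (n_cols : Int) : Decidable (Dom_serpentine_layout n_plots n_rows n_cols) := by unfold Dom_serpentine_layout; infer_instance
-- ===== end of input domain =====

-- B replaces A's full nested row/column sweep by direct index arithmetic per plot,
-- looping only to min(n_plots, n_rows*n_cols) (objective: faster, asymptotic).


-- ===== PORT A =====
def serpentine_layout (n_plots : Int) (n_rows : Int) (n_cols : Int) : List (Int × Int) :=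
  ((PySem.List.pyRange 1 (n_rows + 1) 1).foldl
    (fun s row =>
      let cols : List Int :=
        if PySem.Int.mod row 2 == 1 then PySem.List.pyRange 1 (n_cols + 1) 1
        else PySem.List.pyRange n_cols 0 (-1)
      cols.foldl
        (fun s col => if s.2 < n_plots then (s.1 ++ [(row, col)], s.2 + 1) else s) s)
    (([] : List (Int × Int)), (0 : Int))).1

-- ===== PORT B =====
def serpentine_layout_alt (n_plots : Int) (n_rows : Int) (n_cols : Int) : List (Int × Int) :=
  if n_rows ≤ 0 ∨ n_cols ≤ 0 then []
  else
    let n := min n_plots (n_rows * n_cols)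
    (PySem.List.pyRange 0 n 1).foldl
      (fun positions k =>
        let row := PySem.Int.floordiv k n_cols
        let pos := PySem.Int.mod k n_cols
        positions ++ [(row + 1, if PySem.Int.mod row 2 == 0 then pos + 1 else n_cols - pos)])
      []

-- ===== PRECONDITION & SPEC =====
def Spec_serpentine_layout (n_plots : Int) (n_rows : Int) (n_cols : Int) (out : List (Int × Int)) : Prop := out = serpentine_layout_alt n_plots n_rows n_cols
instance (n_plots : Int) (n_rows : Int) (n_cols : Int) (out : List (Int × Int)) : Decidable (Spec_serpentine_layout n_plots n_rows n_cols out) := by unfold Spec_serpentine_layout; infer_instance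

-- ===== CLAIM (what is proved, stated in full; the proofs are below) =====
def Claim_equal_serpentine_layout : Prop := ∀ (n_plots : Int) (n_rows : Int) (n_cols : Int), Dom_serpentine_layout n_plots n_rows n_cols → Spec_serpentine_layout n_plots n_rows n_cols (serpentine_layout n_plots n_rows n_cols)

-- ===== LEMMAS AND PROOFS =====

-- one serpentine row of A, as (row, col) pairs
def pvRowList (n_cols row : Int) : List (Int × Int) :=
  (if PySem.Int.mod row 2 == 1 then PySem.List.pyRange 1 (n_cols + 1) 1
   else PySem.List.pyRange n_cols 0 (-1)).map (fun col => (row, col))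

-- the full serpentine grid after m rows
def pvSerp (n_cols : Int) : Nat → List (Int × Int)
  | 0 => []
  | m + 1 => pvSerp n_cols m ++ pvRowList n_cols ((m : Int) + 1)

-- B's per-index formula, in Nat form
def pvF (cn : Nat) (j : Nat) : Int × Int :=
  (((j / cn + 1 : Nat) : Int),
   if (j / cn) % 2 = 0 then ((j % cn + 1 : Nat) : Int) else ((cn - j % cn : Nat) : Int))

lemma pv_foldl_append {α β : Type} (g : α → β) (l : List α) (init : List β) :
    l.foldl (fun acc x => acc ++ [g x]) init = init ++ l.map g := by
  induction l generalizing init with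
  | nil => simp
  | cons a t ih => simp [ih]

lemma pv_inner (n_plots row : Int) (cols : List Int) (acc : List (Int × Int)) :
    cols.foldl (fun s col => if s.2 < n_plots then (s.1 ++ [(row, col)], s.2 + 1) else s)
      (acc, (acc.length : Int))
    = (acc ++ (cols.map (fun col => (row, col))).take (n_plots.toNat - acc.length),
       (((acc ++ (cols.map (fun col => (row, col))).take (n_plots.toNat - acc.length)).length : Nat) : Int)) := by
  induction cols generalizing acc with
  | nil => simp
  | cons c t ih =>
    by_cases h : (acc.length : Int) < n_plots
    · have e : ((acc ++ [(row, c)]).length : Int) = (acc.length : Int) + 1 := by simp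
      have h1 : n_plots.toNat - acc.length = (n_plots.toNat - (acc ++ [(row, c)]).length) + 1 := by
        simp only [List.length_append, List.length_cons, List.length_nil]; omega
      simp only [List.foldl_cons, if_pos h]
      rw [← e, ih (acc ++ [(row, c)])]
      simp only [List.map_cons, h1, List.take_succ_cons, List.append_assoc, List.singleton_append]
    · have h0 : n_plots.toNat - acc.length = 0 := by omega
      simp only [List.foldl_cons, if_neg h]
      rw [ih acc]
      simp [h0]

lemma pv_outer (n_plots n_cols : Int) (m : Nat) :
    (PySem.List.pyRange 1 ((m : Int) + 1) 1).foldl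
      (fun s row =>
        (if PySem.Int.mod row 2 == 1 then PySem.List.pyRange 1 (n_cols + 1) 1
         else PySem.List.pyRange n_cols 0 (-1)).foldl
          (fun s col => if s.2 < n_plots then (s.1 ++ [(row, col)], s.2 + 1) else s) s)
      (([] : List (Int × Int)), (0 : Int))
    = ((pvSerp n_cols m).take n_plots.toNat,
       ((((pvSerp n_cols m).take n_plots.toNat).length : Nat) : Int)) := by
  induction m with
  | zero => simp [PySem.List.pyRange_one_eq_nil, pvSerp]
  | succ m ih =>
    rw [show ((m + 1 : Nat) : Int) + 1 = ((m : Int) + 1) + 1 by push_cast; ring,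
        show PySem.List.pyRange 1 (((m : Int) + 1) + 1) 1
            = PySem.List.pyRange 1 ((m : Int) + 1) 1 ++ [(m : Int) + 1] from
          PySem.List.pyRange_one_succ_right (by omega),
        List.foldl_append, ih]
    simp only [List.foldl_cons, List.foldl_nil]
    rw [pv_inner]
    have hlen : n_plots.toNat - ((pvSerp n_cols m).take n_plots.toNat).length
        = n_plots.toNat - (pvSerp n_cols m).length := by
      simp only [List.length_take]; omega
    rw [hlen]
    have : pvSerp n_cols (m + 1) = pvSerp n_cols m ++ pvRowList n_cols ((m : Int) + 1) := rfl
    rw [this, List.take_append, pvRowList]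

lemma pv_serp_nil (n_cols : Int) (hc : n_cols ≤ 0) (m : Nat) : pvSerp n_cols m = [] := by
  induction m with
  | zero => rfl
  | succ m ih =>
    show pvSerp n_cols m ++ pvRowList n_cols ((m : Int) + 1) = []
    rw [ih, pvRowList]
    rcases em ((PySem.Int.mod ((m : Int) + 1) 2 == 1) = true) with h | h
    · rw [if_pos h]
      simp [PySem.List.pyRange_one_eq_nil (by omega : n_cols + 1 ≤ 1)]
    · rw [if_neg h]
      simp [PySem.List.pyRange_neg_one_eq_nil (by omega : n_cols ≤ 0)]

lemma pv_serp_eq (cn : Nat) (hc : 0 < cn) (m : Nat) :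
    pvSerp (cn : Int) m = (List.range (m * cn)).map (pvF cn) := by
  induction m with
  | zero => simp [pvSerp]
  | succ m ih =>
    show pvSerp (cn : Int) m ++ pvRowList (cn : Int) ((m : Int) + 1)
        = (List.range ((m + 1) * cn)).map (pvF cn)
    rw [ih, Nat.succ_mul, List.range_add, List.map_append, List.map_map]
    congr 1
    have hpar : (PySem.Int.mod ((m : Int) + 1) 2 == 1) = (decide (m % 2 = 0)) := by
      rw [PySem.Int.mod_eq_emod_of_pos (by norm_num)]
      rcases Nat.even_or_odd m with he | ho
      · have h2 : m % 2 = 0 := Nat.even_iff.mp he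
        have : ((m : Int) + 1) % 2 = 1 := by omega
        simp [this, h2]
      · have h2 : m % 2 = 1 := Nat.odd_iff.mp ho
        have : ((m : Int) + 1) % 2 = 0 := by omega
        simp [this, h2]
    rw [pvRowList, hpar]
    by_cases hm : m % 2 = 0
    · rw [if_pos (by simp [hm]), PySem.List.pyRange_one]
      have : (((cn : Int) + 1) - 1).toNat = cn := by omega
      rw [this, List.map_map]
      refine List.map_congr_left (fun k hk => ?_)
      have hk' : k < cn := List.mem_range.mp hk
      have hdiv : (m * cn + k) / cn = m := by
        rw [mul_comm, Nat.mul_add_div hc, Nat.div_eq_of_lt hk']; omega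
      have hmod : (m * cn + k) % cn = k := by
        rw [mul_comm, Nat.mul_add_mod, Nat.mod_eq_of_lt hk']
      simp only [Function.comp, pvF, hdiv, hmod, if_pos hm]
      rw [Prod.mk.injEq]
      constructor <;> push_cast <;> ring
    · rw [if_neg (by simp [hm]), PySem.List.pyRange_neg_one]
      have : ((cn : Int) - 0).toNat = cn := by omega
      rw [this, List.map_map]
      refine List.map_congr_left (fun k hk => ?_)
      have hk' : k < cn := List.mem_range.mp hk
      have hdiv : (m * cn + k) / cn = m := by
        rw [mul_comm, Nat.mul_add_div hc, Nat.div_eq_of_lt hk']; omega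
      have hmod : (m * cn + k) % cn = k := by
        rw [mul_comm, Nat.mul_add_mod, Nat.mod_eq_of_lt hk']
      simp only [Function.comp, pvF, hdiv, hmod, if_neg hm]
      rw [Prod.mk.injEq]
      constructor
      · push_cast; ring
      · push_cast [Nat.cast_sub hk'.le]; ring

lemma pv_alt_eq (n_plots n_rows n_cols : Int) (hr : 0 < n_rows) (hc : 0 < n_cols) :
    serpentine_layout_alt n_plots n_rows n_cols
    = (List.range (min n_plots.toNat (n_rows.toNat * n_cols.toNat))).map (pvF n_cols.toNat) := by
  obtain ⟨cn, rfl⟩ : ∃ cn : Nat, n_cols = (cn : Int) :=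
    ⟨n_cols.toNat, (Int.toNat_of_nonneg hc.le).symm⟩
  have hcn : 0 < cn := by exact_mod_cast hc
  unfold serpentine_layout_alt
  rw [if_neg (by omega)]
  have hN : (min n_plots (n_rows * (cn : Int))).toNat = min n_plots.toNat (n_rows.toNat * cn) := by
    have hm : ((n_rows.toNat * cn : Nat) : Int) = n_rows * (cn : Int) := by
      push_cast [Int.toNat_of_nonneg hr.le]; ring
    omega
  show (PySem.List.pyRange 0 (min n_plots (n_rows * (cn : Int))) 1).foldl
      (fun positions k =>
        positions ++ [(PySem.Int.floordiv k (cn : Int) + 1,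
          if PySem.Int.mod (PySem.Int.floordiv k (cn : Int)) 2 == 0
          then PySem.Int.mod k (cn : Int) + 1 else (cn : Int) - PySem.Int.mod k (cn : Int))]) []
    = _
  rw [PySem.List.pyRange_one, pv_foldl_append, List.nil_append, List.map_map]
  rw [show (min n_plots (n_rows * (cn : Int)) - 0).toNat = min n_plots.toNat (n_rows.toNat * cn)
      by simpa using hN]
  rw [show ((cn : Int)).toNat = cn from Int.toNat_natCast cn]
  refine List.map_congr_left (fun k hk => ?_)
  simp only [Function.comp, zero_add, PySem.Int.floordiv_natCast, PySem.Int.mod_natCast]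
  have hm2 : PySem.Int.mod ((k / cn : Nat) : Int) 2 = (((k / cn) % 2 : Nat) : Int) := by
    rw [PySem.Int.mod_eq_emod_of_pos (by norm_num)]; push_cast; rfl
  rw [hm2]
  by_cases hpar : (k / cn) % 2 = 0
  · have hcond : (((((k / cn) % 2 : Nat)) : Int) == 0) = true := by rw [hpar]; rfl
    rw [if_pos hcond]
    simp only [pvF, if_pos hpar]
    rw [Prod.mk.injEq]
    constructor <;> push_cast <;> ring
  · have hcond : (((((k / cn) % 2 : Nat)) : Int) == 0) = false := by
      simp only [beq_eq_false_iff_ne, ne_eq, Nat.cast_eq_zero]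
      exact hpar
    rw [if_neg (ne_true_of_eq_false hcond)]
    simp only [pvF, if_neg hpar]
    rw [Prod.mk.injEq]
    constructor
    · push_cast; ring
    · have hle : k % cn ≤ cn := (Nat.mod_lt _ (by omega)).le
      push_cast [Nat.cast_sub hle]; ring

theorem serpentine_layout_spec : Claim_equal_serpentine_layout := by
  intro n_plots n_rows n_cols _
  unfold Spec_serpentine_layout
  by_cases hr : n_rows ≤ 0
  · have hA : serpentine_layout n_plots n_rows n_cols = [] := by
      unfold serpentine_layout
      rw [show PySem.List.pyRange 1 (n_rows + 1) 1 = [] from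
        PySem.List.pyRange_one_eq_nil (by omega)]
      rfl
    rw [hA]
    unfold serpentine_layout_alt
    rw [if_pos (Or.inl hr)]
  · push_neg at hr
    have hrr : ((n_rows.toNat : Nat) : Int) = n_rows := Int.toNat_of_nonneg hr.le
    have h := pv_outer n_plots n_cols n_rows.toNat
    rw [hrr] at h
    have hA : serpentine_layout n_plots n_rows n_cols
        = (pvSerp n_cols n_rows.toNat).take n_plots.toNat := congrArg Prod.fst h
    rw [hA]
    by_cases hc : n_cols ≤ 0
    · rw [pv_serp_nil n_cols hc]
      unfold serpentine_layout_alt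
      rw [if_pos (Or.inr hc)]
      exact List.take_nil
    · push_neg at hc
      have hcc : n_cols = ((n_cols.toNat : Nat) : Int) := by omega
      rw [pv_alt_eq n_plots n_rows n_cols hr hc, hcc,
          pv_serp_eq n_cols.toNat (by omega) n_rows.toNat,
          ← List.map_take, List.take_range]
      rw [show ((n_cols.toNat : Int)).toNat = n_cols.toNat from Int.toNat_natCast n_cols.toNat]
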